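-- pv_equiv track=rewrite | github.com/jvitorgsousa/deposito_estudos | python/!2167_falha_motor.py | check_queda
-- ===== SOURCE A (Python) =====
-- def check_queda(lista, tamanho):
--     maior = 0
--     for c in range(tamanho):
--         if lista[c] > maior:
--             maior = lista[c]
--         if lista[c] < maior:
--             return c
--     return 0
-- ===== SOURCE B (Python) =====
-- def check_queda(lista, tamanho):
--     # One lazy scan: index c is a "drop" iff lista[c] is below the max of
--     # 0 and all earlier elements (computed per index from a slice);
--     # next() yields the first such c, defaulting to 0.
--     return next((c for c in range(tamanho) if lista[c] < max([0, *lista[:c]])), 0)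
-- ===== Notes on version B (the rewrite author's own statement) =====
-- stated objective: simpler
-- what changed: Replaces the running-max accumulator loop with a single next() over a generator that recomputes each index's prefix maximum from a slice, returning the first index below it.
import Mathlib
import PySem

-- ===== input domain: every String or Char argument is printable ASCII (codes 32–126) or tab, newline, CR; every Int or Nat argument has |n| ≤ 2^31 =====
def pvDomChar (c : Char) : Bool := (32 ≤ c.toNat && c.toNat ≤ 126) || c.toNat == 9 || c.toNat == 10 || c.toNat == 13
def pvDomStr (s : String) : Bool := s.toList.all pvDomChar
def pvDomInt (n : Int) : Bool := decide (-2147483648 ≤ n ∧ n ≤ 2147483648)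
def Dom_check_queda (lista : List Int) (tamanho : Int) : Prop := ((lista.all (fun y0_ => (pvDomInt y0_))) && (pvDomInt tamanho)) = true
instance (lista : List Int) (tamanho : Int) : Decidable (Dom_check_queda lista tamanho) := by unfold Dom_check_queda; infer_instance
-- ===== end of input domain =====

-- B replaces A's running-max accumulator loop by a single next() over a generator
-- recomputing each index's prefix maximum from a slice (objective: simpler; not faster).

-- ===== PORT A =====
-- the for-loop over range(tamanho) with early return, carrying the accumulator `maior`;
-- range(tamanho) is walked lazily as in Python: c counts up, fuel = remaining iterations
def check_queda_goA (lista : List Int) : Nat → Int → Int → Int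
  | 0, _, _ => 0
  | fuel + 1, c, maior =>
    let x := PySem.List.pyGetD lista c 0  -- lista[c]; in-range under Pre_
    let maior' := if x > maior then x else maior
    if x < maior' then c else check_queda_goA lista fuel (c + 1) maior'

def check_queda (lista : List Int) (tamanho : Int) : Int :=
  check_queda_goA lista tamanho.toNat 0 0

-- ===== PORT B =====
-- next((c for c in range(tamanho) if lista[c] < max([0, *lista[:c]])), 0)
def check_queda_goB (lista : List Int) : Nat → Int → Int
  | 0, _ => 0
  | fuel + 1, c =>
    if PySem.List.pyGetD lista c 0 <
        ((PySem.List.max? (0 :: PySem.List.slice lista none (some c)) (fun y => y)).getD 0)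
    then c else check_queda_goB lista fuel (c + 1)

def check_queda_alt (lista : List Int) (tamanho : Int) : Int :=
  check_queda_goB lista tamanho.toNat 0

-- ===== PRECONDITION & SPEC =====
-- exactly the inputs on which A returns: either the whole range is in bounds,
-- or some index drops below the running max (seeded 0), so A returns early
def Pre_check_queda (lista : List Int) (tamanho : Int) : Prop :=
  tamanho ≤ lista.length ∨
    ∃ c : Nat, c < lista.length ∧
      (lista.getD c 0 < 0 ∨ ∃ j : Nat, j < c ∧ lista.getD c 0 < lista.getD j 0)
instance (lista : List Int) (tamanho : Int) : Decidable (Pre_check_queda lista tamanho) := by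
  unfold Pre_check_queda; infer_instance
def pvWitness_check_queda : List Int × Int := ([5, 3], 2)

def Spec_check_queda (lista : List Int) (tamanho : Int) (out : Int) : Prop := out = check_queda_alt lista tamanho
instance (lista : List Int) (tamanho : Int) (out : Int) : Decidable (Spec_check_queda lista tamanho out) := by unfold Spec_check_queda; infer_instance

-- ===== CLAIM (what is proved, stated in full; the proofs are below) =====
def Claim_equal_check_queda : Prop := ∀ (lista : List Int) (tamanho : Int), Dom_check_queda lista tamanho → Pre_check_queda lista tamanho → Spec_check_queda lista tamanho (check_queda lista tamanho)

-- ===== LEMMAS AND PROOFS =====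

-- the prefix maximum B recomputes at index k, and A carries as `maior`
def pvPM (lista : List Int) (k : Int) : Int :=
  (PySem.List.slice lista none (some k)).foldl max 0

theorem pvPM_nonneg (lista : List Int) (k : Int) : 0 ≤ pvPM lista k := by
  unfold pvPM
  generalize PySem.List.slice lista none (some k) = l
  induction l generalizing k with
  | nil => simp
  | cons a t ih =>
      simp only [List.foldl_cons]
      calc (0 : Int) ≤ max 0 a := le_max_left _ _
        _ ≤ t.foldl max (max 0 a) := (PySem.List.le_foldl_max t (max 0 a)).1

theorem pvPM_step (lista : List Int) (k : Int) (hk : 0 ≤ k) :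
    pvPM lista (k + 1) = max (pvPM lista k) (PySem.List.pyGetD lista k 0) := by
  unfold pvPM
  rw [PySem.List.slice_to lista hk, PySem.List.slice_to lista (by omega : (0:Int) ≤ k + 1)]
  have hk1 : (k + 1).toNat = k.toNat + 1 := by omega
  rw [hk1]
  by_cases h : k.toNat < lista.length
  · have : lista.take (k.toNat + 1) = lista.take k.toNat ++ [lista[k.toNat]] := by
      rw [List.take_add_one]
      simp [List.getElem?_eq_getElem h]
    rw [this, List.foldl_append]
    simp [PySem.List.pyGetD_eq_getElem lista 0 hk (by omega : k < (lista.length : Int))]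
  · have hlen : lista.length ≤ k.toNat := by omega
    rw [List.take_of_length_le hlen, List.take_of_length_le (by omega)]
    have hnone : PySem.List.pyGetD lista k 0 = 0 := by
      have hge : ¬ (k < (lista.length : Int)) := by omega
      simp [PySem.List.pyGetD, PySem.List.pyGet?, PySem.List.pyIdx?, hk, hge]
    rw [hnone]
    have := pvPM_nonneg lista k
    unfold pvPM at this
    rw [PySem.List.slice_to lista hk, List.take_of_length_le hlen] at this
    omega

theorem pv_goA_eq_goB (lista : List Int) :
    ∀ (m : Nat) (k : Int), 0 ≤ k →
      check_queda_goA lista m k (pvPM lista k) =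
      check_queda_goB lista m k := by
  intro m
  induction m with
  | zero =>
      intro k hk
      rfl
  | succ m ih =>
      intro k hk
      show (let x := PySem.List.pyGetD lista k 0
            let maior' := if x > pvPM lista k then x else pvPM lista k
            if x < maior' then k else check_queda_goA lista m (k + 1) maior') =
           (if PySem.List.pyGetD lista k 0 <
               ((PySem.List.max? (0 :: PySem.List.slice lista none (some k)) (fun y => y)).getD 0)
            then k else check_queda_goB lista m (k + 1))
      have hmax : ((PySem.List.max? (0 :: PySem.List.slice lista none (some k)) (fun y => y)).getD 0)
          = pvPM lista k := by
        rw [PySem.List.max?_id_cons]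
        unfold pvPM
        rfl
      set x := PySem.List.pyGetD lista k 0 with hx
      have hmaior' : (if x > pvPM lista k then x else pvPM lista k) = max (pvPM lista k) x := by
        by_cases h : pvPM lista k < x
        · simp [h, max_eq_right (le_of_lt h)]
        · simp [h, max_eq_left (not_lt.mp h)]
      have hcond : (x < max (pvPM lista k) x) ↔ (x < pvPM lista k) := by
        by_cases h : x ≤ pvPM lista k
        · rw [max_eq_left h]
        · rw [max_eq_right (le_of_lt (not_le.mp h))]
          constructor
          · intro hx; exact absurd hx (lt_irrefl x)
          · intro hx; exact absurd (le_of_lt hx) h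
      simp only [hmaior', hmax]
      by_cases hlt : x < pvPM lista k
      · rw [if_pos (hcond.mpr hlt), if_pos hlt]
      · rw [if_neg (fun h => hlt (hcond.mp h)), if_neg hlt]
        rw [← pvPM_step lista k hk]
        exact ih (k + 1) (by omega)

-- ===== VERDICT (by name: the statement is the Claim_ definition above) =====
theorem check_queda_spec : Claim_equal_check_queda := by
  intro lista tamanho _ _
  unfold Spec_check_queda check_queda check_queda_alt
  have h0 : pvPM lista 0 = 0 := by
    unfold pvPM
    rw [PySem.List.slice_to lista (le_refl 0)]
    simp
  rw [← h0]
  exact pv_goA_eq_goB lista tamanho.toNat 0 (le_refl 0)
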